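-- pv_equiv track=rewrite | github.com/Velikolay/playground | leetcode/matrix_layer_peeling.py | iter_border
-- ===== SOURCE A (Python) =====
-- from typing import List, Tuple
--
-- def iter_border(board: List[List[str]]) -> List[Tuple[int, int]]:
--     row, col = 0, 0
--     num_rows = len(board)
--     num_cols = len(board[0])
--     border_loop = [
--         (0, 1, num_cols - 1),
--         (1, 0, num_rows - 1),
--         (0, -1, num_cols - 1),
--         (-1, 0, num_rows - 1),
--     ]
--
--     nodes = []
--     for border in border_loop:
--         for _ in range(border[2]):
--             nodes.append(board[row][col])
--             row += border[0]
--             col += border[1]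
--
--     return nodes
-- ===== SOURCE B (Python) =====
-- from typing import List, Tuple
--
-- def iter_border(board: List[List[str]]) -> List[Tuple[int, int]]:
--     num_rows = len(board)
--     num_cols = len(board[0])
--     top = board[0][0:num_cols - 1]
--     right = [board[r][num_cols - 1] for r in range(num_rows - 1)]
--     bottom = [board[num_rows - 1][c] for c in range(num_cols - 1, 0, -1)]
--     left = [board[r][0] for r in range(num_rows - 1, 0, -1)]
--     return top + right + bottom + left
-- ===== Notes on version B (the rewrite author's own statement) =====
-- stated objective: simpler
-- what changed: Replaces the direction-table walk with mutable row/col state and an appending loop by four directly-indexed border segments (a slice of the top row plus three index comprehensions) concatenated.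
import Mathlib
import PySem

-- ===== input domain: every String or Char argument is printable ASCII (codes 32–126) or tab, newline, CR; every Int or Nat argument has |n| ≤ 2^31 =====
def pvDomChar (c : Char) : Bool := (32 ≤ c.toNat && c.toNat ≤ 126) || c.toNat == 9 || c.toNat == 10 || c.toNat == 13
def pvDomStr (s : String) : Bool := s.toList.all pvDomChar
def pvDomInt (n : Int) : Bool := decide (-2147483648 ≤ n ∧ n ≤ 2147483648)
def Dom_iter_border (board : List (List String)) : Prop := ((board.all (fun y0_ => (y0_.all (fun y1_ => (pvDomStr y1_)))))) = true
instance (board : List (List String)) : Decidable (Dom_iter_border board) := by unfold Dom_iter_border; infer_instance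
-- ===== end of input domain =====

-- B replaces A's direction-table border walk (mutable row/col stepped through four (dr,dc,count)
-- entries) by four directly-indexed border segments concatenated; objective: simpler.

-- ===== PORT A =====
-- board[row][col], totalised with defaults; Pre_ keeps every index in range.
def pvCell (board : List (List String)) (r c : Int) : String :=
  PySem.List.pyGetD (PySem.List.pyGetD board r []) c ""

def iter_border (board : List (List String)) : List String :=
  let numRows : Int := board.length
  let numCols : Int := (PySem.List.pyGetD board 0 []).length
  let borderLoop : List (Int × Int × Int) :=
    [(0, 1, numCols - 1), (1, 0, numRows - 1), (0, -1, numCols - 1), (-1, 0, numRows - 1)]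
  let fin := borderLoop.foldl
    (fun st border =>
      (PySem.List.pyRange 0 border.2.2 1).foldl
        (fun st (_ : Int) =>
          (st.1 + border.1, st.2.1 + border.2.1, st.2.2 ++ [pvCell board st.1 st.2.1]))
        st)
    ((0 : Int), (0 : Int), ([] : List String))
  fin.2.2

-- ===== PORT B =====
def iter_border_alt (board : List (List String)) : List String :=
  let numRows : Int := board.length
  let numCols : Int := (PySem.List.pyGetD board 0 []).length
  let top := PySem.List.slice (PySem.List.pyGetD board 0 []) (some 0) (some (numCols - 1))
  let right := (PySem.List.pyRange 0 (numRows - 1) 1).map (fun r => pvCell board r (numCols - 1))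
  let bottom := (PySem.List.pyRange (numCols - 1) 0 (-1)).map (fun c => pvCell board (numRows - 1) c)
  let left := (PySem.List.pyRange (numRows - 1) 0 (-1)).map (fun r => pvCell board r 0)
  top ++ right ++ bottom ++ left

-- ===== PRECONDITION & SPEC =====
-- Pre_ holds exactly where Python A returns: it excludes only the inputs where A raises IndexError
-- (empty board; or several rows with an empty first row; or some row shorter than the first row).
def Pre_iter_border (board : List (List String)) : Prop :=
  board ≠ [] ∧ (board.length = 1 ∨
    (1 ≤ board.headI.length ∧ ∀ row ∈ board, board.headI.length ≤ row.length))
instance (board : List (List String)) : Decidable (Pre_iter_border board) := by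
  unfold Pre_iter_border; infer_instance

def pvWitness_iter_border : List (List String) := [["a", "b"], ["c", "d"]]

def Spec_iter_border (board : List (List String)) (out : List String) : Prop := out = iter_border_alt board
instance (board : List (List String)) (out : List String) : Decidable (Spec_iter_border board out) := by unfold Spec_iter_border; infer_instance

-- ===== CLAIM (what is proved, stated in full; the proofs are below) =====
def Claim_equal_iter_border : Prop := ∀ (board : List (List String)), Dom_iter_border board → Pre_iter_border board → Spec_iter_border board (iter_border board)

-- ===== LEMMAS AND PROOFS =====

-- A's inner loop: k steps from (row,col) in direction (dr,dc), appending the visited cells.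
theorem pvWalk (board : List (List String)) (dr dc : Int) :
    ∀ (l : List Int) (row col : Int) (acc : List String),
      l.foldl (fun st (_ : Int) => (st.1 + dr, st.2.1 + dc, st.2.2 ++ [pvCell board st.1 st.2.1]))
        (row, col, acc)
      = (row + l.length * dr, col + l.length * dc,
         acc ++ (List.range l.length).map
           (fun (i : Nat) => pvCell board (row + (i : Int) * dr) (col + (i : Int) * dc))) := by
  intro l
  induction l with
  | nil => intro row col acc; simp
  | cons x t ih =>
    intro row col acc
    simp only [List.foldl_cons, ih, List.length_cons]
    refine Prod.ext ?_ (Prod.ext ?_ ?_)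
    · push_cast; ring
    · push_cast; ring
    · rw [List.range_succ_eq_map]
      simp only [List.map_cons, List.map_map, List.singleton_append, List.append_assoc]
      congr 1
      congr 1
      · simp
      · refine List.map_congr_left ?_
        intro i _
        have h1 : row + dr + (i : Int) * dr = row + ((i + 1 : Nat) : Int) * dr := by push_cast; ring
        have h2 : col + dc + (i : Int) * dc = col + ((i + 1 : Nat) : Int) * dc := by push_cast; ring
        simp [Function.comp, h1, h2]

theorem take_eq_map_range {xs : List String} {k : Nat} (hk : k ≤ xs.length) :
    xs.take k = (List.range k).map (fun i => xs.getD i "") := by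
  apply List.ext_getElem
  · simp [Nat.min_eq_left hk]
  · intro i h1 h2
    simp at h1 h2 ⊢
    simp [List.getElem?_eq_getElem (show i < xs.length by omega)]

-- ===== VERDICT (by name: the statement is the Claim_ definition above) =====
theorem iter_border_spec : Claim_equal_iter_border := by
  intro board _ hpre
  obtain ⟨hne, hrest⟩ := hpre
  show iter_border board = iter_border_alt board
  rcases Nat.eq_zero_or_pos (PySem.List.pyGetD board 0 []).length with hm0 | hm0
  · -- first row empty: Pre_ forces board = [[]]
    cases board with
    | nil => exact absurd rfl hne
    | cons b bs =>
      have hb : b = [] := by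
        simpa [PySem.List.pyGetD_zero, List.length_eq_zero_iff] using hm0
      have hbs : bs = [] := by
        rcases hrest with h | ⟨h1, _⟩
        · simpa using h
        · rw [hb] at h1; simp at h1
      subst hb; subst hbs; decide
  · have hn0 : 1 ≤ board.length := by
      cases board with
      | nil => exact absurd rfl hne
      | cons b bs => simp
    simp only [iter_border, iter_border_alt, List.foldl_cons, List.foldl_nil]
    rw [pvWalk, pvWalk, pvWalk, pvWalk]
    simp only [mul_zero, add_zero, zero_add, mul_one, List.nil_append, List.append_assoc,
      PySem.List.length_pyRange_one, sub_zero]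
    set m := (PySem.List.pyGetD board 0 []).length with hm
    set n := board.length with hn
    have hmt : ((m : Int) - 1).toNat = m - 1 := by omega
    have hnt : ((n : Int) - 1).toNat = n - 1 := by omega
    have hmc : (((m - 1 : Nat)) : Int) = (m : Int) - 1 := by omega
    have hnc : (((n - 1 : Nat)) : Int) = (n : Int) - 1 := by omega
    rw [hmt, hnt]
    congr 1
    · -- top segment
      have hs := PySem.List.slice_toNat (PySem.List.pyGetD board 0 [])
        (le_refl (0 : Int)) (show (0 : Int) ≤ (m : Int) - 1 by omega)
      rw [hs, hmt]
      simp only [Int.toNat_zero, List.drop_zero, Nat.sub_zero]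
      rw [take_eq_map_range (by omega)]
      refine List.map_congr_left ?_
      intro i _
      simp [pvCell]
    congr 1
    · -- right segment
      rw [PySem.List.pyRange_one, sub_zero, hnt, List.map_map]
      refine List.map_congr_left ?_
      intro i _
      simp [Function.comp, hmc]
    congr 1
    · -- bottom segment
      rw [PySem.List.pyRange_neg_one, sub_zero, hmt, List.map_map]
      refine List.map_congr_left ?_
      intro i _
      simp only [Function.comp]
      congr 1
      all_goals omega
    · -- left segment
      rw [PySem.List.pyRange_neg_one, sub_zero, hnt, List.map_map]
      refine List.map_congr_left ?_
      intro i _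
      simp only [Function.comp]
      congr 1
      all_goals omega
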